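-- pv_equiv track=rewrite | github.com/dislovelhl/acgs-lite | packages/enhanced_agent_bus/context_memory/cognee_memory.py | _derive_compliance_verdict
-- ===== SOURCE A (Python) =====
-- from typing import Any
--
-- def _derive_compliance_verdict(findings: list[dict[str, Any]]) -> tuple[bool | None, str]:
--     if not findings:
--         return None, ""
--
--     negative_markers = (
--         "violation",
--         "violates",
--         "non-compliant",
--         "not compliant",
--         "does not comply",
--         "forbidden",
--         "blocked",
--         "denied",
--         "reject",
--     )
--     positive_markers = (
--         "compliant",
--         "complies",
--         "approved",
--         "allowed",
--         "permit",
--         "permitted",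
--         "no violation",
--     )
--
--     relevant_snippets: list[str] = []
--     saw_positive = False
--     for finding in findings:
--         content = str(finding.get("content", ""))
--         content_lower = content.lower()
--         if any(marker in content_lower for marker in negative_markers):
--             return False, content
--         if any(marker in content_lower for marker in positive_markers):
--             saw_positive = True
--             relevant_snippets.append(content)
--
--     if saw_positive:
--         return True, relevant_snippets[0]
--
--     return None, ""
-- ===== SOURCE B (Python) =====
-- def _derive_compliance_verdict(findings):
--     if not findings:
--         return None, ""
--
--     negative_markers = (
--         "violation", "violates", "non-compliant", "not compliant",
--         "does not comply", "forbidden", "blocked", "denied", "reject",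
--     )
--     positive_markers = (
--         "compliant", "complies", "approved", "allowed",
--         "permit", "permitted", "no violation",
--     )
--
--     def content_of(finding):
--         return str(finding.get("content", ""))
--
--     def hits(markers, finding):
--         text = content_of(finding).lower()
--         return any(marker in text for marker in markers)
--
--     negative = next((f for f in findings if hits(negative_markers, f)), None)
--     if negative is not None:
--         return False, content_of(negative)
--
--     positive = next((f for f in findings if hits(positive_markers, f)), None)
--     if positive is not None:
--         return True, content_of(positive)
--
--     return None, ""
-- ===== Notes on version B (the rewrite author's own statement) =====
-- stated objective: simpler
-- what changed: Replaces A's single stateful loop (early negative return, saw_positive flag and a snippet accumulator list) with two stateless next() scans: first finding matching a negative marker, else first finding matching a positive marker.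
import Mathlib
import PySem

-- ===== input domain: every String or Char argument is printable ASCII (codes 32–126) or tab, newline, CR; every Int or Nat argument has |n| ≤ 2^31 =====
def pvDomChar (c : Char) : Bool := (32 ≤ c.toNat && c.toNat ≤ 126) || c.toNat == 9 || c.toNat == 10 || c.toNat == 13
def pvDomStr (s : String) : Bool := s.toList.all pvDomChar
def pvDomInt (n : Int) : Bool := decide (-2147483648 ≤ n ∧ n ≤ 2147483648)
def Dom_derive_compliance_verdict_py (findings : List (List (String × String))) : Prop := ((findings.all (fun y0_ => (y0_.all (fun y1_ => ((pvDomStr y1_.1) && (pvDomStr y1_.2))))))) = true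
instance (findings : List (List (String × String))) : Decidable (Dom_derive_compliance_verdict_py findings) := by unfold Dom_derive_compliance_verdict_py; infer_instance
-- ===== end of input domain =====

-- B replaces A's single stateful loop (early return, saw_positive flag, snippet accumulator)
-- with two stateless first-match scans: first negative-marker finding, else first positive-marker finding.


-- ===== PORT A =====
def pvNegMarkers : List String :=
  ["violation", "violates", "non-compliant", "not compliant",
   "does not comply", "forbidden", "blocked", "denied", "reject"]

def pvPosMarkers : List String :=
  ["compliant", "complies", "approved", "allowed", "permit", "permitted", "no violation"]

-- str(finding.get("content", "")): the dict values are strings, so str() is the identity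
def pvContent (finding : List (String × String)) : String :=
  PySem.Dict.getD (PySem.Dict.mk finding) "content" ""

-- the for-loop of A, with its state (saw_positive, relevant_snippets);
-- relevant_snippets[0] is taken only when saw_positive, which guarantees nonemptiness
def pvLoopA : List (List (String × String)) → Bool → List String → Option Bool × String
  | [], sawPositive, relevantSnippets =>
      if sawPositive then (some true, (PySem.List.pyGet? relevantSnippets 0).getD "")
      else (none, "")
  | finding :: rest, sawPositive, relevantSnippets =>
      let content := pvContent finding
      let contentLower := PySem.Str.lower content
      if pvNegMarkers.any (fun m => PySem.Str.isIn m contentLower) then (some false, content)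
      else if pvPosMarkers.any (fun m => PySem.Str.isIn m contentLower) then
        pvLoopA rest true (relevantSnippets ++ [content])
      else pvLoopA rest sawPositive relevantSnippets

def derive_compliance_verdict_py (findings : List (List (String × String))) : Option Bool × String :=
  if findings = [] then (none, "")
  else pvLoopA findings false []

-- ===== PORT B =====
def pvHits (markers : List String) (finding : List (String × String)) : Bool :=
  markers.any (fun m => PySem.Str.isIn m (PySem.Str.lower (pvContent finding)))

def derive_compliance_verdict_py_alt (findings : List (List (String × String))) : Option Bool × String :=
  if findings = [] then (none, "")
  else
    match findings.find? (pvHits pvNegMarkers) with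
    | some f => (some false, pvContent f)
    | none =>
      match findings.find? (pvHits pvPosMarkers) with
      | some f => (some true, pvContent f)
      | none => (none, "")

-- ===== PRECONDITION & SPEC =====
def Spec_derive_compliance_verdict_py (findings : List (List (String × String))) (out : Option Bool × String) : Prop := out = derive_compliance_verdict_py_alt findings
instance (findings : List (List (String × String))) (out : Option Bool × String) : Decidable (Spec_derive_compliance_verdict_py findings out) := by unfold Spec_derive_compliance_verdict_py; infer_instance

-- ===== CLAIM (what is proved, stated in full; the proofs are below) =====
def Claim_equal_derive_compliance_verdict_py : Prop := ∀ (findings : List (List (String × String))), Dom_derive_compliance_verdict_py findings → Spec_derive_compliance_verdict_py findings (derive_compliance_verdict_py findings)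

-- ===== LEMMAS AND PROOFS =====

-- invariant characterisation of A's loop: given snips nonempty exactly when saw is set,
-- the loop equals the two-phase first-match scan (with snips.head standing for the first positive)
lemma pvLoopA_eq (l : List (List (String × String))) (saw : Bool) (snips : List String)
    (h : saw = true ↔ snips ≠ []) :
    pvLoopA l saw snips =
      match l.find? (pvHits pvNegMarkers) with
      | some f => (some false, pvContent f)
      | none =>
        if saw then (some true, (PySem.List.pyGet? snips 0).getD "")
        else
          match l.find? (pvHits pvPosMarkers) with
          | some f => (some true, pvContent f)
          | none => (none, "") := by
  induction l generalizing saw snips with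
  | nil => simp [pvLoopA]
  | cons f rest ih =>
    have e1 : (pvNegMarkers.any fun m => PySem.Str.isIn m (PySem.Str.lower (pvContent f))) = pvHits pvNegMarkers f := rfl
    have e2 : (pvPosMarkers.any fun m => PySem.Str.isIn m (PySem.Str.lower (pvContent f))) = pvHits pvPosMarkers f := rfl
    simp only [pvLoopA, List.find?_cons, e1, e2]
    cases hneg : pvHits pvNegMarkers f with
    | true => simp
    | false =>
      simp only [Bool.false_eq_true, if_false]
      cases hpos : pvHits pvPosMarkers f with
      | true =>
        rw [ih true (snips ++ [pvContent f]) (by simp)]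
        simp only [if_true]
        cases hsaw : saw with
        | true =>
          have hs : snips ≠ [] := h.mp hsaw
          cases snips with
          | nil => exact absurd rfl hs
          | cons s ss =>
            simp [PySem.List.pyGet?, PySem.List.pyIdx?,
              show (0:Int) ≤ (ss.length:Int) + 1 from by positivity]
        | false =>
          have hs : snips = [] := by
            by_contra hne
            exact absurd (h.mpr hne) (by simp [hsaw])
          subst hs
          simp [PySem.List.pyGet?, PySem.List.pyIdx?]
      | false =>
        rw [ih saw snips h]
        simp

-- ===== VERDICT (by name: the statement is the Claim_ definition above) =====
theorem derive_compliance_verdict_py_spec : Claim_equal_derive_compliance_verdict_py := by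
  intro findings _
  unfold Spec_derive_compliance_verdict_py derive_compliance_verdict_py derive_compliance_verdict_py_alt
  by_cases hnil : findings = []
  · simp [hnil]
  · rw [if_neg hnil, if_neg hnil, pvLoopA_eq findings false [] (by simp)]
    simp
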